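-- pv_equiv track=rewrite | github.com/AnaClaraZoppiSerpa/Research | code/mds/mds_search/search.py | array_to_right_circulant_matrix
-- ===== SOURCE A (Python) =====
-- def array_to_right_circulant_matrix(array):
--     first_row = list(array)
--     dim = len(first_row)
--
--     rows = []
--     prev_row = []
--
--     for i in range(dim):
--         if i == 0:
--             rows.append(first_row)
--             prev_row = first_row
--         else:
--             new_first = prev_row[-1]
--             new_row = [new_first]
--             new_row += prev_row[0:-1]
--             rows.append(new_row)
--             prev_row = new_row
--     return rows
-- ===== SOURCE B (Python) =====
-- def array_to_right_circulant_matrix(array):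
--     first_row = list(array)
--     dim = len(first_row)
--     return [first_row[dim - i:] + first_row[:dim - i] for i in range(dim)]
-- ===== Notes on version B (the rewrite author's own statement) =====
-- stated objective: simpler
-- what changed: Each row is built independently by slicing the original first_row at offset dim-i, replacing the loop that carries a prev_row accumulator and rotates it one step per iteration.
import Mathlib
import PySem

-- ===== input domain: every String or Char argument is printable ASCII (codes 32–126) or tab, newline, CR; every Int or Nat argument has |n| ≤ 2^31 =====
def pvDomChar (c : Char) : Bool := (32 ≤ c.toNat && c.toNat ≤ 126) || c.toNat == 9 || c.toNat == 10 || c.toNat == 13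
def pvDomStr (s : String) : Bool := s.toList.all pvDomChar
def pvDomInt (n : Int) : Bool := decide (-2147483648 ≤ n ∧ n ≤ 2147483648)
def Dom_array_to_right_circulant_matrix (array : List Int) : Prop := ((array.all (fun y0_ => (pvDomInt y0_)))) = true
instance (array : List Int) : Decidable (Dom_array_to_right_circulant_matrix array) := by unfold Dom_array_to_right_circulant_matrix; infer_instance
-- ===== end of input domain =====

-- B builds each row independently by slicing first_row, instead of A's per-step rotation of a prev_row accumulator (objective: simpler).

-- ===== PORT A =====
def array_to_right_circulant_matrix (array : List Int) : List (List Int) :=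
  let first_row := array
  let dim : Int := first_row.length
  ((PySem.List.pyRange 0 dim 1).foldl
    (fun (st : List (List Int) × List Int) i =>
      if i = 0 then (st.1 ++ [first_row], first_row)
      else
        -- prev_row[-1]: in Python prev_row is nonempty whenever this branch runs (dim ≥ 1), so the .getD 0 default is never used
        let new_first := (PySem.List.pyGet? st.2 (-1)).getD 0
        let new_row := [new_first] ++ PySem.List.slice st.2 (some 0) (some (-1))
        (st.1 ++ [new_row], new_row))
    ([], [])).1

-- ===== PORT B =====
def array_to_right_circulant_matrix_alt (array : List Int) : List (List Int) :=
  let first_row := array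
  let dim : Int := first_row.length
  (PySem.List.pyRange 0 dim 1).map
    (fun i => PySem.List.slice first_row (some (dim - i)) none ++
              PySem.List.slice first_row none (some (dim - i)))

-- ===== PRECONDITION & SPEC =====
def Spec_array_to_right_circulant_matrix (array : List Int) (out : List (List Int)) : Prop := out = array_to_right_circulant_matrix_alt array
instance (array : List Int) (out : List (List Int)) : Decidable (Spec_array_to_right_circulant_matrix array out) := by unfold Spec_array_to_right_circulant_matrix; infer_instance

-- ===== CLAIM (what is proved, stated in full; the proofs are below) =====
def Claim_equal_array_to_right_circulant_matrix : Prop := ∀ (array : List Int), Dom_array_to_right_circulant_matrix array → Spec_array_to_right_circulant_matrix array (array_to_right_circulant_matrix array)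

-- ===== LEMMAS AND PROOFS =====

-- left rotation by m: the common normal form of both ports' rows
def pvRot (xs : List Int) (m : Nat) : List Int := xs.drop m ++ xs.take m

lemma pvRot_full (xs : List Int) : pvRot xs xs.length = xs := by
  simp [pvRot]

-- one rotation step: last element to the front
lemma pvRot_step (xs : List Int) (m : Nat) (h1 : 1 ≤ m) (h2 : m ≤ xs.length) :
    [(PySem.List.pyGet? (pvRot xs m) (-1)).getD 0] ++
      PySem.List.slice (pvRot xs m) (some 0) (some (-1)) = pvRot xs (m - 1) := by
  have hm1 : m - 1 < xs.length := by omega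
  have htake : xs.take m ≠ [] := by
    rw [Ne, List.take_eq_nil_iff]
    rintro (h | h)
    · omega
    · subst h; simp at h2; omega
  rw [PySem.List.pyGet?_neg_one]
  rw [PySem.List.slice_zero_start, PySem.List.slice_to_neg_one]
  unfold pvRot
  rw [List.getLast?_append_of_ne_nil _ htake, List.dropLast_append_of_ne_nil htake]
  have hlast : (xs.take m).getLast? = some xs[m - 1] := by
    rw [List.getLast?_eq_getElem?]
    simp only [List.getElem?_take, List.length_take]
    refine if_pos ?_ |>.trans ?_
    · omega
    · rw [Nat.min_eq_left h2]
      exact List.getElem?_eq_getElem hm1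
  rw [hlast]
  have hdl : (xs.take m).dropLast = xs.take (m - 1) := by
    rw [List.dropLast_eq_take, List.take_take]
    congr 1
    simp [List.length_take]
    omega
  rw [hdl]
  have hd : xs[m - 1] :: xs.drop m = xs.drop (m - 1) := by
    have h := @List.getElem_cons_drop _ xs (m - 1) hm1
    rwa [show m - 1 + 1 = m by omega] at h
  simp only [Option.getD_some, List.singleton_append]
  rw [← List.cons_append, hd]

-- A's loop invariant
lemma a_fold_inv (xs : List Int) (k : Nat) (hk : k ≤ xs.length) :
    ((PySem.List.pyRange 0 (k : Int) 1).foldl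
      (fun (st : List (List Int) × List Int) i =>
        if i = 0 then (st.1 ++ [xs], xs)
        else
          let new_first := (PySem.List.pyGet? st.2 (-1)).getD 0
          let new_row := [new_first] ++ PySem.List.slice st.2 (some 0) (some (-1))
          (st.1 ++ [new_row], new_row))
      ([], []))
    = ((List.range k).map (fun j => pvRot xs (xs.length - j)),
        if k = 0 then [] else pvRot xs (xs.length - (k - 1))) := by
  induction k with
  | zero => simp [PySem.List.pyRange_one_eq_nil]
  | succ k ih =>
    have hk' : k ≤ xs.length := by omega
    have hsplit : PySem.List.pyRange 0 ((k : Int) + 1) 1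
        = PySem.List.pyRange 0 (k : Int) 1 ++ [(k : Int)] :=
      PySem.List.pyRange_one_succ_right (by positivity)
    push_cast
    rw [hsplit, List.foldl_append, ih hk']
    by_cases hk0 : k = 0
    · subst hk0
      simp [pvRot_full]
    · have hne : ((k : Int)) ≠ 0 := by exact_mod_cast hk0
      simp only [List.foldl_cons, List.foldl_nil, if_neg hne, hk0, if_false]
      have hstep := pvRot_step xs (xs.length - (k - 1)) (by omega) (by omega)
      have harg : xs.length - (k - 1) - 1 = xs.length - k := by omega
      rw [harg] at hstep
      simp only [hstep]
      simp [List.range_succ]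

lemma a_eq_rot (xs : List Int) :
    array_to_right_circulant_matrix xs
      = (List.range xs.length).map (fun j => pvRot xs (xs.length - j)) := by
  unfold array_to_right_circulant_matrix
  simp only []
  rw [a_fold_inv xs xs.length le_rfl]

lemma b_eq_rot (xs : List Int) :
    array_to_right_circulant_matrix_alt xs
      = (List.range xs.length).map (fun j => pvRot xs (xs.length - j)) := by
  unfold array_to_right_circulant_matrix_alt
  simp only []
  rw [PySem.List.pyRange_one]
  simp only [Int.sub_zero, Int.toNat_natCast, List.map_map]
  apply List.map_congr_left
  intro k hk
  simp only [List.mem_range] at hk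
  have hcast : (xs.length : Int) - (0 + (k : Int)) = ((xs.length - k : Nat) : Int) := by
    omega
  simp only [Function.comp_apply, hcast,
    PySem.List.slice_from_natCast, PySem.List.slice_to_natCast, pvRot]

-- ===== VERDICT (by name: the statement is the Claim_ definition above) =====
theorem array_to_right_circulant_matrix_spec : Claim_equal_array_to_right_circulant_matrix := by
  intro array _
  unfold Spec_array_to_right_circulant_matrix
  rw [a_eq_rot, b_eq_rot]
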